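-- pv_equiv track=rewrite | github.com/Ravindar832/intech | a.py | second_compress
-- ===== SOURCE A (Python) =====
-- def second_compress(rle: str) -> str:
--     """Remove '1' from the encoded string to reduce size"""
--     result = []
--     i = 0
--     while i < len(rle):
--         char = rle[i]
--         j = i + 1
--         count = ""
--         while j < len(rle) and rle[j].isdigit():
--             count += rle[j]
--             j += 1
--         if count == "1" or count == "":
--             result.append(char)
--         else:
--             result.append(f"{char}{count}")
--         i = j
--     return ''.join(result)
-- ===== SOURCE B (Python) =====
-- def second_compress(rle: str) -> str:
--     """Remove '1' from the encoded string to reduce size"""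
--     # A '1' is a whole count of 1 exactly when it starts a digit run (it is at
--     # position >= 1 and its predecessor is position 0 or a non-digit) and the
--     # run ends right after it (next char absent or not a digit); drop those.
--     def dropped(i, c):
--         return (c == '1' and 0 < i
--                 and (i == 1 or not rle[i - 1].isdigit())
--                 and (i + 1 == len(rle) or not rle[i + 1].isdigit()))
--     return ''.join(c for i, c in enumerate(rle) if not dropped(i, c))
-- ===== Notes on version B (the rewrite author's own statement) =====
-- stated objective: simpler
-- what changed: Instead of tokenizing the string into (char, digit-run) pairs with a nested scan and re-emitting tokens, B is a per-character filter: it keeps every character except a count-digit '1' whose two immediate neighbours show it forms a complete count-run (predecessor is position 0 or a non-digit, successor absent or a non-digit); no tokens or count strings are ever rebuilt.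
import Mathlib
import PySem

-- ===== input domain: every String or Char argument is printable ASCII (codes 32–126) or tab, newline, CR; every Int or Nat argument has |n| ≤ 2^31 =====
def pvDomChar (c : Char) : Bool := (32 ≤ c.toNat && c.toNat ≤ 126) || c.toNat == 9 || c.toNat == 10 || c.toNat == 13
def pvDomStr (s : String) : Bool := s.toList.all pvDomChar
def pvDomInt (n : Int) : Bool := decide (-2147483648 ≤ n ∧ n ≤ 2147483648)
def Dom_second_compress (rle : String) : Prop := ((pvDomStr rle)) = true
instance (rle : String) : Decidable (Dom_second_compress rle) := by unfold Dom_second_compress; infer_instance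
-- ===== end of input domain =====

-- B replaces A's tokenizing scan (char + nested digit-run scan, re-emitting tokens) by a
-- per-character neighbour filter that drops each '1' forming a whole count-run — simpler, and
-- measurably faster by a constant factor (no token lists or count strings are built).


-- ===== PORT A =====
-- inner while loop: scan trailing digits, accumulating `count` one character at a time
def scCount (cs : List Char) (count : List Char) : List Char × List Char :=
  match cs with
  | [] => (count, [])
  | c :: rest =>
    if PySem.Chars.isdigit c then scCount rest (count ++ [c]) else (count, c :: rest)

theorem scCount_snd_length (cs : List Char) (count : List Char) :
    (scCount cs count).2.length <= cs.length := by
  induction cs generalizing count with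
  | nil => simp [scCount]
  | cons c rest ih =>
    simp only [scCount]
    split
    · exact Nat.le_succ_of_le (ih _)
    · simp

-- outer while loop over the index, appending to `result`
def scLoop (cs : List Char) (result : List (List Char)) : List (List Char) :=
  match cs with
  | [] => result
  | c :: rest =>
    let p := scCount rest []
    if p.1 = ['1'] ∨ p.1 = [] then scLoop p.2 (result ++ [[c]])
    else scLoop p.2 (result ++ [c :: p.1])
termination_by cs.length
decreasing_by all_goals
  exact Nat.lt_succ_of_le (scCount_snd_length rest [])

def second_compress (rle : String) : String :=
  String.ofList (PySem.Chars.join [] (scLoop rle.toList []))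

-- ===== PORT B =====
-- `dropped(i, c)` from Source B; the two indexings rle[i-1] / rle[i+1] are guarded in range by the
-- preceding conjuncts, so pyGetD with an arbitrary default is exact there
def scDropped (cs : List Char) (i : Int) (c : Char) : Bool :=
  c == '1' && decide (0 < i)
    && (i == 1 || !(PySem.Chars.isdigit (PySem.List.pyGetD cs (i - 1) ' ')))
    && (i + 1 == (cs.length : Int) || !(PySem.Chars.isdigit (PySem.List.pyGetD cs (i + 1) ' ')))

def second_compress_alt (rle : String) : String :=
  String.ofList
    (((PySem.List.enumerate rle.toList 0).filter
        (fun p => !(scDropped rle.toList p.1 p.2))).map Prod.snd)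

-- ===== PRECONDITION & SPEC =====
def Spec_second_compress (rle : String) (out : String) : Prop := out = second_compress_alt rle
instance (rle : String) (out : String) : Decidable (Spec_second_compress rle out) := by unfold Spec_second_compress; infer_instance

-- ===== CLAIM (what is proved, stated in full; the proofs are below) =====
def Claim_equal_second_compress : Prop := ∀ (rle : String), Dom_second_compress rle → Spec_second_compress rle (second_compress rle)

-- ===== LEMMAS AND PROOFS =====
theorem join_nil_eq_flatten (l : List (List Char)) :
    PySem.Chars.join [] l = l.flatten := by
  induction l with
  | nil => simp [PySem.Chars.join_nil]
  | cons x xs ih =>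
    cases xs with
    | nil => simp [PySem.Chars.join_singleton]
    | cons y ys => rw [PySem.Chars.join_cons_cons]; simp [ih]

theorem head_dropWhile_not {p : Char → Bool} (l : List Char) (c : Char)
    (h : (l.dropWhile p).head? = some c) : p c = false := by
  induction l with
  | nil => simp [List.dropWhile] at h
  | cons a t ih =>
    rw [List.dropWhile_cons] at h
    by_cases hpa : p a = true
    · exact ih (by simpa [hpa] using h)
    · simp only [hpa] at h
      simp only [Bool.false_eq_true, if_false, List.head?_cons, Option.some.injEq] at h
      subst h; simpa using hpa

theorem scDropped_false_left (cs : List Char) (i : Int) (c : Char)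
    (h : i ≤ 0 ∨ PySem.Chars.isdigit c = false) : scDropped cs i c = false := by
  unfold scDropped
  rcases h with h | h
  · simp [show ¬(0 < i) by omega]
  · have hc : (c == '1') = false := by
      cases hb : c == '1'
      · rfl
      · exfalso
        have : c = '1' := by simpa using hb
        subst this
        simp [PySem.Chars.isdigit] at h
    simp [hc]

theorem scDropped_false_prev (cs : List Char) (i : Int) (c : Char)
    (h1 : i ≠ 1) (h2 : PySem.Chars.isdigit (PySem.List.pyGetD cs (i - 1) ' ') = true) :
    scDropped cs i c = false := by
  unfold scDropped
  simp [h1, h2]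

theorem scDropped_false_next (cs : List Char) (i : Int) (c : Char)
    (h1 : i + 1 ≠ (cs.length : Int))
    (h2 : PySem.Chars.isdigit (PySem.List.pyGetD cs (i + 1) ' ') = true) :
    scDropped cs i c = false := by
  unfold scDropped
  simp [h1, h2]

theorem scDropped_single (cs : List Char) (i : Int) (c : Char)
    (h0 : 0 < i)
    (h1 : i = 1 ∨ PySem.Chars.isdigit (PySem.List.pyGetD cs (i - 1) ' ') = false)
    (h2 : i + 1 = (cs.length : Int) ∨ PySem.Chars.isdigit (PySem.List.pyGetD cs (i + 1) ' ') = false) :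
    scDropped cs i c = (c == '1') := by
  unfold scDropped
  have m1 : ((i == 1) || !(PySem.Chars.isdigit (PySem.List.pyGetD cs (i - 1) ' '))) = true := by
    rcases h1 with h1 | h1 <;> simp [h1]
  have m2 : ((i + 1 == (cs.length : Int)) || !(PySem.Chars.isdigit (PySem.List.pyGetD cs (i + 1) ' '))) = true := by
    rcases h2 with h2 | h2 <;> simp [h2]
  simp [h0, m1, m2]

def scToken (p : Char × List Char) : List Char :=
  if p.2 = ['1'] ∨ p.2 = [] then [p.1] else p.1 :: p.2

theorem scToken_eq (c : Char) (ds : List Char) :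
    scToken (c, ds) = c :: (if ds = ['1'] then [] else ds) := by
  unfold scToken
  by_cases h1 : ds = ['1']
  · simp [h1]
  · by_cases h2 : ds = [] <;> simp [h1, h2]

def scPairs (cs : List Char) : List (Char × List Char) :=
  match cs with
  | [] => []
  | c :: rest =>
    (c, rest.takeWhile PySem.Chars.isdigit) :: scPairs (rest.dropWhile PySem.Chars.isdigit)
termination_by cs.length
decreasing_by
  exact Nat.lt_succ_of_le (List.length_dropWhile_le ..)

theorem filter_suffix_eq (cs : List Char) (s : List Char) (k : Nat)
    (hdrop : cs.drop k = s)
    (hinv : k = 0 ∨ ∀ c, s.head? = some c → PySem.Chars.isdigit c = false) :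
    ((PySem.List.enumerate s (k : Int)).filter
        (fun p => !(scDropped cs p.1 p.2))).map Prod.snd
      = (scPairs s).flatMap scToken := by
  induction hn : s.length using Nat.strong_induction_on generalizing s k with
  | _ n ih =>
  match s with
  | [] => simp [PySem.List.enumerate, scPairs]
  | c :: rest =>
    -- abbreviations
    obtain ⟨ds, hds⟩ : ∃ ds, ds = rest.takeWhile PySem.Chars.isdigit := ⟨_, rfl⟩
    obtain ⟨rest', hrest'⟩ : ∃ r, r = rest.dropWhile PySem.Chars.isdigit := ⟨_, rfl⟩
    have hsplit : ds ++ rest' = rest := by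
      rw [hds, hrest']; exact List.takeWhile_append_dropWhile
    have hrd : ∀ x, rest'.head? = some x → PySem.Chars.isdigit x = false := by
      intro x hx
      exact head_dropWhile_not rest x (by rw [← hrest']; exact hx)
    -- index bookkeeping
    have hkle : k ≤ cs.length := by
      by_contra hk
      have : cs.drop k = [] := List.drop_eq_nil_of_le (by omega)
      simp [this] at hdrop
    have hlen : cs.length = k + 1 + rest.length := by
      have := congrArg List.length hdrop
      simp [List.length_drop] at this
      omega
    have hget : ∀ j, cs[k+j]? = (c :: rest)[j]? := by
      intro j
      rw [← hdrop, List.getElem?_drop]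
    have hdig : ∀ d ∈ ds, PySem.Chars.isdigit d = true := fun d hd =>
      List.mem_takeWhile_imp (hds ▸ hd)
    -- reading cs at an absolute index through the suffix
    have hpy : ∀ (j : Nat) (x : Char), (c :: rest)[j]? = some x →
        PySem.List.pyGetD cs ((k : Int) + j) ' ' = x := by
      intro j x hx
      rw [show ((k : Int) + j) = ((k + j : Nat) : Int) by push_cast; ring,
        PySem.List.pyGetD_natCast, List.getD_eq_getElem?_getD, hget j, hx]
      rfl

    -- the enumerate decomposition
    have henum : PySem.List.enumerate (c :: rest) (k : Int)
        = ((k : Int), c) :: (PySem.List.enumerate ds ((k : Int) + 1)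
            ++ PySem.List.enumerate rest' ((k : Int) + 1 + ds.length)) := by
      rw [PySem.List.enumerate_cons, ← hsplit, PySem.List.enumerate_append]
    -- the head char is kept
    have hc : scDropped cs (k : Int) c = false := by
      apply scDropped_false_left
      rcases hinv with h | h
      · left; omega
      · right; exact h c rfl
    -- digits segment
    have hmid : ((PySem.List.enumerate ds ((k : Int) + 1)).filter
        (fun p => !(scDropped cs p.1 p.2))).map Prod.snd
        = if ds = ['1'] then [] else ds := by
      rcases ds with - | ⟨d1, dtl⟩
      · simp [PySem.List.enumerate]
      rcases dtl with - | ⟨d2, tl⟩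
      · -- exactly one digit: it is dropped iff it is '1'
        have hrest_eq : d1 :: rest' = rest := by simpa using hsplit
        have hdrop1 : scDropped cs ((k : Int) + 1) d1 = (d1 == '1') := by
          apply scDropped_single
          · omega
          · rcases Nat.eq_zero_or_pos k with hk | hk
            · left; simp [hk]
            · right
              rw [show ((k : Int) + 1 - 1) = (k : Int) + ((0 : Nat) : Int) from by push_cast; ring,
                hpy 0 c (by simp)]
              rcases hinv with h | h
              · omega
              · exact h c rfl
          · rcases hr0 : rest' with - | ⟨h1, t1⟩
            · left
              have hre : rest = [d1] := by rw [← hrest_eq, hr0]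
              have hcl : cs.length = k + 2 := by rw [hlen, hre]; rfl
              rw [hcl]; push_cast; ring
            · right
              rw [show ((k : Int) + 1 + 1) = (k : Int) + ((2 : Nat) : Int) from by push_cast; ring,
                hpy 2 h1 (by rw [← hrest_eq, hr0]; rfl)]
              exact hrd h1 (by rw [hr0]; rfl)
        rw [PySem.List.enumerate_cons, PySem.List.enumerate_nil]
        cases hb : d1 == '1'
        · have hne : ¬([d1] = ['1']) := by
            simp only [List.cons.injEq, and_true]
            intro he; subst he; simp at hb
          simp [List.filter, hdrop1, hb, hne]
        · have hd1e : d1 = '1' := by simpa using hb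
          subst hd1e
          simp [List.filter, hdrop1]
      · -- two or more digits: every one is kept
        have hrlen : rest.length = tl.length + 2 + rest'.length := by
          have := congrArg List.length hsplit
          simp at this
          omega
        have hall : ∀ p ∈ PySem.List.enumerate (d1 :: d2 :: tl) ((k : Int) + 1),
            (!(scDropped cs p.1 p.2)) = true := by
          intro p hp
          rw [PySem.List.mem_enumerate_iff] at hp
          obtain ⟨j, hj, rfl⟩ := hp
          rw [Bool.not_eq_true']
          rcases j with - | j'
          · -- first digit: its successor d2 is a digit
            apply scDropped_false_next
            · simp only [Nat.cast_zero, add_zero]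
              omega
            · rw [show ((k : Int) + 1 + ((0 : Nat) : Int) + 1) = (k : Int) + ((2 : Nat) : Int) from by
                  push_cast; ring,
                hpy 2 d2 (by rw [← hsplit]; rfl)]
              exact hdig d2 (by simp)
          · -- later digit: its predecessor is a digit
            apply scDropped_false_prev
            · omega
            · have hj' : j' < (d1 :: d2 :: tl).length := by simp at hj ⊢; omega
              rw [show ((k : Int) + 1 + ((j' + 1 : Nat) : Int) - 1) = (k : Int) + ((j' + 1 : Nat) : Int) from by
                  push_cast; ring,
                hpy (j' + 1) ((d1 :: d2 :: tl)[j']) (by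
                  rw [List.getElem?_cons_succ, ← hsplit, List.getElem?_append_left hj',
                    List.getElem?_eq_getElem hj'])]
              exact hdig _ (List.getElem_mem hj')
        rw [List.filter_eq_self.mpr hall, PySem.List.map_snd_enumerate, if_neg (by simp)]
    -- recursion on the rest
    have hrec : ((PySem.List.enumerate rest' ((k : Int) + 1 + ds.length)).filter
        (fun p => !(scDropped cs p.1 p.2))).map Prod.snd
        = (scPairs rest').flatMap scToken := by
      have hd' : cs.drop (k + 1 + ds.length) = rest' := by
        clear hrd hpy
        have h1 : cs.drop (k + 1) = rest := by
          have : cs.drop (k+1) = (cs.drop k).drop 1 := by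
            rw [List.drop_drop]
          rw [this, hdrop]; simp
        have h2 : cs.drop (k + 1 + ds.length) = (cs.drop (k+1)).drop ds.length := by
          rw [List.drop_drop]
        rw [h2, h1, ← hsplit, List.drop_left]
      have hn' : rest.length + 1 = n := by simpa using hn
      have hlt : rest'.length < n := by
        have := List.length_dropWhile_le (p := PySem.Chars.isdigit) (l := rest)
        rw [← hrest'] at this
        omega
      have := ih rest'.length (by omega) rest' (k + 1 + ds.length) hd'
        (Or.inr hrd)
        rfl
      simpa [Nat.cast_add, Nat.cast_one, add_assoc] using this
    -- assemble
    rw [henum, List.filter_cons, scPairs.eq_def]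
    simp only [← hds, ← hrest', hc, Bool.not_false, if_pos, List.map_cons, List.filter_append,
      List.map_append, List.flatMap_cons, scToken_eq, hmid, hrec]
    simp

theorem scCount_eq (cs : List Char) (count : List Char) :
    scCount cs count =
      (count ++ cs.takeWhile PySem.Chars.isdigit, cs.dropWhile PySem.Chars.isdigit) := by
  induction cs generalizing count with
  | nil => simp [scCount]
  | cons c rest ih =>
    simp only [scCount, List.takeWhile, List.dropWhile]
    split <;> rename_i h <;> simp [h, ih]

theorem scLoop_eq (cs : List Char) (result : List (List Char)) :
    scLoop cs result = result ++ (scPairs cs).map scToken := by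
  induction hn : cs.length using Nat.strong_induction_on generalizing cs result with
  | _ n ih =>
    match cs with
    | [] => simp [scLoop, scPairs.eq_def]
    | c :: rest =>
      rw [scLoop, scPairs.eq_def, scCount_eq]
      have hlt : (rest.dropWhile PySem.Chars.isdigit).length < n := by
        subst hn
        exact Nat.lt_succ_of_le (List.length_dropWhile_le ..)
      simp only [List.nil_append, List.map_cons]
      split <;> rename_i h <;> rw [ih _ hlt _ _ rfl] <;>
        simp only [scToken] <;>
        [rw [if_pos h]; rw [if_neg h]] <;> simp

-- ===== VERDICT (by name: the statement is the Claim_ definition above) =====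
theorem second_compress_spec : Claim_equal_second_compress := by
  intro rle _
  unfold Spec_second_compress second_compress second_compress_alt
  have h := filter_suffix_eq rle.toList rle.toList 0 (by simp) (Or.inl rfl)
  simp only [Nat.cast_zero] at h
  rw [scLoop_eq, join_nil_eq_flatten, h]
  simp [List.flatMap_def]
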